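-- pv_equiv track=rewrite | github.com/songololo/phd | phd/explore/diversity/deprecated/diversity_stirling_tuning_simple.py | hill
-- ===== SOURCE A (Python) =====
-- def hill(uses_unique, uses_probs, exp):
--
--     diversity = 0
--     diversity_primary = 0
--     diversity_secondary = 0
--     diversity_tertiary = 0
--     diversity_composite = 0
--     for i in range(len(uses_unique) - 1):
--         a = uses_unique[i]
--         a_proportion = uses_probs[i]
--         j = i + 1
--         while j < len(uses_unique):
--             b = uses_unique[j]
--             b_proportion = uses_probs[j]
--             if a[:1] != b[:1]:
--                 diversity_primary += i ** exp
--                 diversity += i ** exp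
--             elif a[1:2] != b[1:2]:
--                 diversity_secondary += i ** exp
--                 diversity += i ** exp
--             # since these are unique, no need to check remaining char
--             else:
--                 diversity_tertiary += i ** exp
--                 diversity += i ** exp
--             j += 1
--     return diversity
-- ===== SOURCE B (Python) =====
-- def hill(uses_unique, uses_probs, exp):
--     # Each ordered pair (i, j) with i < j contributes i ** exp regardless of the
--     # branch taken, so sum (n-1-i) * i**exp in a single pass.
--     n = len(uses_unique)
--     return sum((n - 1 - i) * i ** exp for i in range(n - 1))
-- ===== Notes on version B (the rewrite author's own statement) =====
-- stated objective: faster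
-- what changed: All three branches of A add the same i**exp, so B replaces the nested O(n^2) pair loop with a single pass summing (n-1-i)*i**exp; the unused category accumulators and string comparisons disappear.
import Mathlib
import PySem

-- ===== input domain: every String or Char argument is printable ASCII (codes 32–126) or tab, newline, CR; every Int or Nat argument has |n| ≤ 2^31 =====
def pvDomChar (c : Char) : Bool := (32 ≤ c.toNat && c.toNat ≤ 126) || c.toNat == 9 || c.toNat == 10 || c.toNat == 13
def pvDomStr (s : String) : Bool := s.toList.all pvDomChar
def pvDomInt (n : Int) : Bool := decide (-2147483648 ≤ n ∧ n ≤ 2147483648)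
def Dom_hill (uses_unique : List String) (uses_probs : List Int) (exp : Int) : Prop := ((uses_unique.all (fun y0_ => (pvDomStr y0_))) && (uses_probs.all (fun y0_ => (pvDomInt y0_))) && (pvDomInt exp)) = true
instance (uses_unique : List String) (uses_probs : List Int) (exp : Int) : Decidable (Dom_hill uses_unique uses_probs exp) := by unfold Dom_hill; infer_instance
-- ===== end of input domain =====

-- B replaces A's nested pair loop by one pass summing (n-1-i)*i**exp (every branch of A adds the same term); asymptotically faster.


-- ===== PORT A =====
-- inner 'while j < len(uses_unique)' loop; 'i ** exp' is ported as 'i ^ exp.toNat',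
-- exact under Pre_'s '0 ≤ exp' (Python raises/returns a float for exp < 0 with n ≥ 2).
-- The dead per-category accumulators (never returned) are not carried; the branch
-- structure and the string-slice comparisons are kept.
def hillWhile (uses_unique : List String) (uses_probs : List Int) (a : String) (i exp : Int) (j : Nat) (diversity : Int) : Int :=
  if j < uses_unique.length then
    let b := PySem.List.pyGetD uses_unique (j : Int) ""
    let _b_proportion := PySem.List.pyGetD uses_probs (j : Int) 0
    let diversity' :=
      if PySem.Str.slice a none (some 1) ≠ PySem.Str.slice b none (some 1) then
        diversity + i ^ exp.toNat
      else if PySem.Str.slice a (some 1) (some 2) ≠ PySem.Str.slice b (some 1) (some 2) then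
        diversity + i ^ exp.toNat
      else
        diversity + i ^ exp.toNat
    hillWhile uses_unique uses_probs a i exp (j + 1) diversity'
  else diversity
termination_by uses_unique.length - j

def hill (uses_unique : List String) (uses_probs : List Int) (exp : Int) : Int :=
  (PySem.List.pyRange 0 ((uses_unique.length : Int) - 1) 1).foldl
    (fun diversity i =>
      let a := PySem.List.pyGetD uses_unique i ""
      let _a_proportion := PySem.List.pyGetD uses_probs i 0
      hillWhile uses_unique uses_probs a i exp (i.toNat + 1) diversity)
    0

-- ===== PORT B =====
def hill_alt (uses_unique : List String) (uses_probs : List Int) (exp : Int) : Int :=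
  let n : Int := uses_unique.length
  ((PySem.List.pyRange 0 (n - 1) 1).map (fun i => (n - 1 - i) * i ^ exp.toNat)).sum

-- ===== PRECONDITION & SPEC =====
-- Pre_ excludes exactly the inputs where A raises: with n ≥ 2, an exp < 0 hits
-- 0 ** exp (ZeroDivisionError, float otherwise), and uses_probs shorter than
-- uses_unique hits an out-of-range uses_probs[j] (IndexError).
def Pre_hill (uses_unique : List String) (uses_probs : List Int) (exp : Int) : Prop :=
  uses_unique.length ≤ 1 ∨ (uses_unique.length ≤ uses_probs.length ∧ 0 ≤ exp)
instance (uses_unique : List String) (uses_probs : List Int) (exp : Int) : Decidable (Pre_hill uses_unique uses_probs exp) := by unfold Pre_hill; infer_instance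

def pvWitness_hill : List String × List Int × Int := (["a", "b", "c"], [1, 2, 3], 2)


def Spec_hill (uses_unique : List String) (uses_probs : List Int) (exp : Int) (out : Int) : Prop := out = hill_alt uses_unique uses_probs exp
instance (uses_unique : List String) (uses_probs : List Int) (exp : Int) (out : Int) : Decidable (Spec_hill uses_unique uses_probs exp out) := by unfold Spec_hill; infer_instance

-- ===== CLAIM (what is proved, stated in full; the proofs are below) =====
def Claim_equal_hill : Prop := ∀ (uses_unique : List String) (uses_probs : List Int) (exp : Int), Dom_hill uses_unique uses_probs exp → Pre_hill uses_unique uses_probs exp → Spec_hill uses_unique uses_probs exp (hill uses_unique uses_probs exp)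

-- ===== LEMMAS AND PROOFS =====

-- Every branch of A's inner loop adds the same i ^ exp, so one pass of the while
-- loop from j adds (len − j) copies of it.
theorem hillWhile_eq (uses_unique : List String) (uses_probs : List Int) (a : String) (i exp : Int) (j : Nat) (diversity : Int) :
    hillWhile uses_unique uses_probs a i exp j diversity
      = diversity + ((uses_unique.length - j : Nat) : Int) * i ^ exp.toNat := by
  by_cases h : j < uses_unique.length
  · rw [hillWhile]
    simp only [h, if_pos]
    have ih := hillWhile_eq uses_unique uses_probs a i exp (j + 1) (diversity + i ^ exp.toNat)
    split_ifs with h1 h2 <;>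
    · rw [ih]
      have hlen : uses_unique.length - j = (uses_unique.length - (j + 1)) + 1 := by omega
      rw [hlen]
      push_cast
      ring
  · rw [hillWhile]
    simp only [h, if_neg, not_false_iff]
    have : uses_unique.length - j = 0 := by omega
    simp [this]
termination_by uses_unique.length - j

-- ===== VERDICT (by name: the statement is the Claim_ definition above) =====
theorem hill_spec : Claim_equal_hill := by
  intro uses_unique uses_probs exp _ _
  unfold Spec_hill hill hill_alt
  have hfun : (fun (diversity i : Int) =>
        let a := PySem.List.pyGetD uses_unique i ""
        let _a_proportion := PySem.List.pyGetD uses_probs i 0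
        hillWhile uses_unique uses_probs a i exp (i.toNat + 1) diversity)
      = fun acc i => acc + ((uses_unique.length - (i.toNat + 1) : Nat) : Int) * i ^ exp.toNat := by
    funext acc i
    simp only []
    rw [hillWhile_eq]
  rw [hfun, PySem.List.foldl_add, zero_add]
  congr 1
  apply List.map_congr_left
  intro i hi
  rw [PySem.List.mem_pyRange_one] at hi
  have h1 : ((uses_unique.length - (i.toNat + 1) : Nat) : Int) = (uses_unique.length : Int) - 1 - i := by
    omega
  rw [h1]
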